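-- pv_equiv track=rewrite | github.com/mehmetcanozen/llmtermproject | src/final_assets.py | metric_fieldnames
-- ===== SOURCE A (Python) =====
-- from typing import Any, Iterable
--
-- def metric_fieldnames(rows: list[dict[str, Any]]) -> list[str]:
--     preferred = [
--         "system",
--         "dataset",
--         "model_size",
--         "run_id",
--         "eval_scope",
--         "source_file",
--         "artifact_mode",
--         "example_count",
--         "rejected_by_verifier_count",
--         "answerable_count",
--         "unanswerable_count",
--         "answer_coverage",
--         "citation_format_rate",
--         "support_proxy_sentence_rate",
--         "unsupported_non_abstained_rate",
--         "abstention_rate",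
--         "retrieval_hit_rate",
--         "exact_answer_accuracy",
--         "correct_citation_rate",
--         "false_attribution_rate",
--         "abstention_rate_unanswerable",
--         "asqa_short_answer_coverage",
--         "phase08_package_scope",
--         "formal_full_eval_pass",
--         "scope_note",
--     ]
--     keys = set().union(*(row.keys() for row in rows)) if rows else set()
--     return [field for field in preferred if field in keys] + sorted(keys.difference(preferred))
-- ===== SOURCE B (Python) =====
-- from typing import Any
--
-- def metric_fieldnames(rows: list[dict[str, Any]]) -> list[str]:
--     preferred = [
--         "system",
--         "dataset",
--         "model_size",
--         "run_id",
--         "eval_scope",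
--         "source_file",
--         "artifact_mode",
--         "example_count",
--         "rejected_by_verifier_count",
--         "answerable_count",
--         "unanswerable_count",
--         "answer_coverage",
--         "citation_format_rate",
--         "support_proxy_sentence_rate",
--         "unsupported_non_abstained_rate",
--         "abstention_rate",
--         "retrieval_hit_rate",
--         "exact_answer_accuracy",
--         "correct_citation_rate",
--         "false_attribution_rate",
--         "abstention_rate_unanswerable",
--         "asqa_short_answer_coverage",
--         "phase08_package_scope",
--         "formal_full_eval_pass",
--         "scope_note",
--     ]
--     order = {name: i for i, name in enumerate(preferred)}
--     keys = set()
--     for row in rows: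
--         keys.update(row.keys())
--     n = len(preferred)
--     return sorted(keys, key=lambda k: (order.get(k, n), k))
-- ===== Notes on version B (the rewrite author's own statement) =====
-- stated objective: alternative
-- what changed: A filters the preferred list against the key union, separately sorts the leftover keys, and concatenates; B builds a rank dictionary from the preferred list once and returns a single sort of the key union keyed by (rank-or-len(preferred), name).
import Mathlib
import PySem

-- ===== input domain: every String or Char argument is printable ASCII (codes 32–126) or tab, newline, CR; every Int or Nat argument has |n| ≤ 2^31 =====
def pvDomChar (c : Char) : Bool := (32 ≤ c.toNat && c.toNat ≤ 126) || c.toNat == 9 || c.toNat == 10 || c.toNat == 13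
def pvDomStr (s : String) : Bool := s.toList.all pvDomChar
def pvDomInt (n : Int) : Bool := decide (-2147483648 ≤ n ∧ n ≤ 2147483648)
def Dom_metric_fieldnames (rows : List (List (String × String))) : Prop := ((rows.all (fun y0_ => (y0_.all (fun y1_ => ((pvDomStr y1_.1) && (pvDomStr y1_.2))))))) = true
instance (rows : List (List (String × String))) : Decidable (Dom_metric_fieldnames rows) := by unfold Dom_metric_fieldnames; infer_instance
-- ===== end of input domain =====

-- B replaces A's filter-preferred / sort-extras / concatenate pipeline with ONE keyed sort of the
-- key union, keyed by (rank-in-preferred-or-len(preferred), name); alternative decomposition.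

-- the `preferred` literal both Pythons contain
def pvPreferred : List String := [
  "system",
  "dataset",
  "model_size",
  "run_id",
  "eval_scope",
  "source_file",
  "artifact_mode",
  "example_count",
  "rejected_by_verifier_count",
  "answerable_count",
  "unanswerable_count",
  "answer_coverage",
  "citation_format_rate",
  "support_proxy_sentence_rate",
  "unsupported_non_abstained_rate",
  "abstention_rate",
  "retrieval_hit_rate",
  "exact_answer_accuracy",
  "correct_citation_rate",
  "false_attribution_rate",
  "abstention_rate_unanswerable",
  "asqa_short_answer_coverage",
  "phase08_package_scope",
  "formal_full_eval_pass",
  "scope_note"]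

-- ===== PORT A =====
-- keys = set().union(*(row.keys() for row in rows)) if rows else set()   (a fold of set-union over the rows)
def metric_fieldnames (rows : List (List (String × String))) : List String :=
  let keys : PySem.Set String :=
    rows.foldl (fun s row => PySem.Set.union s (PySem.Dict.ofList row).keys) PySem.Set.empty
  pvPreferred.filter (fun field => PySem.Set.contains keys field)
    ++ PySem.List.sorted (PySem.Set.diff keys pvPreferred) (fun x => x) false

-- ===== PORT B =====
-- order = {name: i for i, name in enumerate(preferred)}
def pvOrder : PySem.Dict String Int :=
  (PySem.List.enumerate pvPreferred).foldl (fun d p => d.insert p.2 p.1) PySem.Dict.empty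

-- keys.update(row.keys()) in a loop, then one sort by the tuple key (order.get(k, n), k)
def metric_fieldnames_alt (rows : List (List (String × String))) : List String :=
  let keys : PySem.Set String :=
    rows.foldl (fun s row => PySem.Set.update s (PySem.Dict.ofList row).keys) PySem.Set.empty
  let n : Int := pvPreferred.length
  PySem.List.sorted2 keys (fun k => pvOrder.getD k n) (fun k => k) false

-- ===== PRECONDITION & SPEC =====
def Spec_metric_fieldnames (rows : List (List (String × String))) (out : List String) : Prop := out = metric_fieldnames_alt rows
instance (rows : List (List (String × String))) (out : List String) : Decidable (Spec_metric_fieldnames rows out) := by unfold Spec_metric_fieldnames; infer_instance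

-- ===== CLAIM (what is proved, stated in full; the proofs are below) =====
def Claim_equal_metric_fieldnames : Prop := ∀ (rows : List (List (String × String))), Dom_metric_fieldnames rows → Spec_metric_fieldnames rows (metric_fieldnames rows)

-- ===== LEMMAS AND PROOFS =====

-- the key union both ports build (PySem.Set.union is PySem.Set.update definitionally)
def pvKeys (rows : List (List (String × String))) : PySem.Set String :=
  rows.foldl (fun s row => PySem.Set.update s (PySem.Dict.ofList row).keys) PySem.Set.empty

lemma pvKeys_nodup_aux (rows : List (List (String × String))) (s : PySem.Set String) (hs : s.Nodup) :
    (rows.foldl (fun s row => PySem.Set.update s (PySem.Dict.ofList row).keys) s).Nodup := by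
  induction rows generalizing s with
  | nil => exact hs
  | cons r t ih => exact ih _ (PySem.Set.nodup_update _ _ hs)

lemma pvKeys_nodup (rows : List (List (String × String))) : (pvKeys rows).Nodup :=
  pvKeys_nodup_aux rows _ List.nodup_nil

-- B's two-component sort is a single sort by the lexicographic pair key
lemma sorted2_eq_sorted_lex {α : Type} (xs : List α) (k1 : α → Int) (k2 : α → String) :
    PySem.List.sorted2 xs k1 k2 = PySem.List.sorted xs (fun x => toLex (k1 x, k2 x)) := by
  rw [PySem.List.sorted_eq_foldl_insertBy]
  unfold PySem.List.sorted2
  simp only [if_neg (by decide : ¬ (false = true))]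
  congr 1
  funext acc x
  congr 1
  funext a b
  rw [Bool.eq_iff_iff]
  simp only [Bool.or_eq_true, Bool.and_eq_true, Bool.not_eq_true', decide_eq_true_eq,
    decide_eq_false_iff_not, Prod.Lex.lt_iff, ofLex_toLex]
  by_cases h1 : k1 a < k1 b
  · simp [h1]
  · by_cases h2 : k1 b < k1 a
    · simp [h1, h2]; omega
    · have he : k1 a = k1 b := by omega
      by_cases h3 : k2 a < k2 b <;> simp [h3, he]

lemma pvRank_lt (k : String) (h : k ∈ pvPreferred) :
    pvOrder.getD k (pvPreferred.length : Int) < (pvPreferred.length : Int) := by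
  fin_cases h <;> decide

lemma pvOrder_keys : pvOrder.keys = pvPreferred := by decide

lemma pvRank_of_not_mem (k : String) (h : k ∉ pvPreferred) :
    pvOrder.getD k (pvPreferred.length : Int) = (pvPreferred.length : Int) := by
  apply PySem.Dict.getD_of_not_contains
  rw [Bool.eq_false_iff]
  intro hc
  exact h (pvOrder_keys ▸ (PySem.Dict.contains_iff_mem_keys pvOrder k).1 hc)

lemma pvPreferred_nodup : pvPreferred.Nodup := by decide

lemma pvPreferred_rank_pairwise :
    pvPreferred.Pairwise (fun a b => pvOrder.getD a (pvPreferred.length : Int) < pvOrder.getD b (pvPreferred.length : Int)) := by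
  decide

lemma pvMain (rows : List (List (String × String))) :
    metric_fieldnames rows = metric_fieldnames_alt rows := by
  have hA : (rows.foldl (fun s row => PySem.Set.union s (PySem.Dict.ofList row).keys) PySem.Set.empty) = pvKeys rows := rfl
  simp only [metric_fieldnames, metric_fieldnames_alt, hA]
  show _ = PySem.List.sorted2 (pvKeys rows) _ _ false
  rw [sorted2_eq_sorted_lex]
  set K := pvKeys rows
  have hK : K.Nodup := pvKeys_nodup rows
  symm
  apply PySem.List.sorted_eq_of_perm_of_pairwise_lt
  · -- the concatenation is a permutation of the key set
    have hd : PySem.Set.diff K pvPreferred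
        = K.filter (fun x => !(PySem.Set.contains pvPreferred x)) := rfl
    have hs : (PySem.List.sorted (PySem.Set.diff K pvPreferred) (fun x => x) false).Perm
        (PySem.Set.diff K pvPreferred) := PySem.List.sorted_perm _ _ _
    have hf : (pvPreferred.filter (fun f => PySem.Set.contains K f)).Perm
        (K.filter (fun x => PySem.Set.contains pvPreferred x)) := by
      refine (List.perm_ext_iff_of_nodup (pvPreferred_nodup.filter _) (hK.filter _)).2 ?_
      intro a
      simp [List.mem_filter, PySem.Set.contains]
      tauto
    refine (hf.append hs).trans ?_
    rw [hd]
    exact List.filter_append_perm _ _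
  · -- the concatenation is strictly increasing under the lexicographic key
    rw [List.pairwise_append]
    have hmemL : ∀ x ∈ PySem.List.sorted (PySem.Set.diff K pvPreferred) (fun x => x) false,
        x ∉ pvPreferred := by
      intro x hx
      rw [PySem.List.mem_sorted] at hx
      have := (List.mem_filter.1 hx).2
      simpa [PySem.Set.contains] using this
    refine ⟨?_, ?_, ?_⟩
    · exact (List.Pairwise.sublist List.filter_sublist pvPreferred_rank_pairwise).imp
        (fun h => Prod.Lex.lt_iff.2 (Or.inl h))
    · have h1 : (PySem.List.sorted (PySem.Set.diff K pvPreferred) (fun x => x) false).Pairwise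
          (fun a b => a ≤ b) := PySem.List.sorted_pairwise _ _
      have h2 : (PySem.List.sorted (PySem.Set.diff K pvPreferred) (fun x => x) false).Nodup :=
        ((PySem.List.sorted_perm _ _ _).nodup_iff).2 (hK.filter _)
      refine (h1.and h2).imp_of_mem ?_
      intro a b ha hb h
      have hna := hmemL a ha
      have hnb := hmemL b hb
      refine Prod.Lex.lt_iff.2 (Or.inr ⟨?_, ?_⟩)
      · simp [pvRank_of_not_mem a hna, pvRank_of_not_mem b hnb]
      · exact lt_of_le_of_ne h.1 h.2
    · intro a ha b hb
      have hap : a ∈ pvPreferred := (List.mem_filter.1 ha).1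
      refine Prod.Lex.lt_iff.2 (Or.inl ?_)
      rw [pvRank_of_not_mem b (hmemL b hb)]
      exact pvRank_lt a hap

-- ===== VERDICT (by name: the statement is the Claim_ definition above) =====
theorem metric_fieldnames_spec : Claim_equal_metric_fieldnames := by
  intro rows _
  unfold Spec_metric_fieldnames
  exact pvMain rows
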